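-- pv_equiv track=rewrite | github.com/dennlinger/transformers-topical-change | examples/eval_ensemble.py | convert_to_masses
-- ===== SOURCE A (Python) =====
-- def convert_to_masses(label):
--     curr_len = 1
--     masses = []
--     for el in label:
--         # If next section starts, increase id
--         if el == 0:
--             masses.append(curr_len)
--             curr_len = 1
--         else:
--             curr_len += 1
--     masses.append(curr_len)
--     return tuple(masses)
-- ===== SOURCE B (Python) =====
-- def convert_to_masses(label):
--     label = list(label)
--     cuts = [-1] + [i for i, el in enumerate(label) if el == 0] + [len(label)]
--     return tuple(b - a for a, b in zip(cuts, cuts[1:]))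
-- ===== Notes on version B (the rewrite author's own statement) =====
-- stated objective: alternative
-- what changed: Replaces the running-length accumulator loop by first collecting the indices of boundary labels (el == 0), framing them with -1 and len(label), and returning the consecutive differences of that cut list.
import Mathlib
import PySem

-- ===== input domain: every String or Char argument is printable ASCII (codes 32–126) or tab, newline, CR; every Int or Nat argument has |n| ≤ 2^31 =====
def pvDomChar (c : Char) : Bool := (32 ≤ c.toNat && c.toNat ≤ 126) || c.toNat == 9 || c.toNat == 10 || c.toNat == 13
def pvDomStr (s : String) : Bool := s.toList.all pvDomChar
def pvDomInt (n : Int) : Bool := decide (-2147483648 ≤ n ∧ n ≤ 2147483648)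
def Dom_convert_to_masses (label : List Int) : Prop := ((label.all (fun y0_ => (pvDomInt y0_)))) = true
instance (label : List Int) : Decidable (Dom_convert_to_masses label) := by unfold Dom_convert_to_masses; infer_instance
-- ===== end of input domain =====

-- B builds the list of boundary indices and takes consecutive differences instead of A's running-length loop (alternative decomposition, same cost).
-- ===== PORT A =====
def convert_to_masses (label : List Int) : List Int :=
  let st := label.foldl
    (fun (st : Int × List Int) el =>
      if el == 0 then (1, st.2 ++ [st.1]) else (st.1 + 1, st.2))
    (1, [])
  st.2 ++ [st.1]

-- ===== PORT B =====
def convert_to_masses_alt (label : List Int) : List Int :=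
  let cuts : List Int :=
    -1 :: ((PySem.List.enumerate label).filterMap
      (fun p => if p.2 == 0 then some p.1 else none) ++ [(label.length : Int)])
  List.zipWith (fun a b => b - a) cuts (cuts.drop 1)

-- ===== PRECONDITION & SPEC =====
def Spec_convert_to_masses (label : List Int) (out : List Int) : Prop := out = convert_to_masses_alt label
instance (label : List Int) (out : List Int) : Decidable (Spec_convert_to_masses label out) := by unfold Spec_convert_to_masses; infer_instance

-- ===== CLAIM (what is proved, stated in full; the proofs are below) =====
def Claim_equal_convert_to_masses : Prop := ∀ (label : List Int), Dom_convert_to_masses label → Spec_convert_to_masses label (convert_to_masses label)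

-- ===== LEMMAS AND PROOFS =====

-- ===== VERDICT (by name: the statement is the Claim_ definition above) =====
-- recursive rendering of A's loop without the accumulator
def aRec (xs : List Int) (c : Int) : List Int :=
  match xs with
  | [] => [c]
  | el :: t => if el == 0 then c :: aRec t 1 else aRec t (c + 1)

def bnd (s : Int) (xs : List Int) : List Int :=
  (PySem.List.enumerate xs s).filterMap (fun p => if p.2 == 0 then some p.1 else none)

def diffs (l : List Int) : List Int := List.zipWith (fun a b => b - a) l (l.drop 1)

def stepA (st : Int × List Int) (el : Int) : Int × List Int :=
  if el == 0 then (1, st.2 ++ [st.1]) else (st.1 + 1, st.2)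

theorem bnd_cons (s : Int) (x : Int) (t : List Int) :
    bnd s (x :: t) = (if x == 0 then [s] else []) ++ bnd (s + 1) t := by
  by_cases h : x = 0 <;> simp [bnd, PySem.List.enumerate_cons, h]

theorem diffs_cons (a b : Int) (t : List Int) :
    diffs (a :: b :: t) = (b - a) :: diffs (b :: t) := rfl

-- A's loop result equals the differences of the framed cut list
theorem aRec_eq_diffs (xs : List Int) : ∀ (s c : Int),
    aRec xs c = diffs ((s - c) :: (bnd s xs ++ [s + xs.length])) := by
  induction xs with
  | nil => intro s c; simp [aRec, bnd, diffs, PySem.List.enumerate]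
  | cons x t ih =>
    intro s c
    by_cases hx : x = 0
    · subst hx
      have h1 : bnd s ((0:Int) :: t) ++ [s + (((0:Int) :: t).length : Int)]
          = s :: (bnd (s + 1) t ++ [(s + 1) + (t.length : Int)]) := by
        rw [bnd_cons]
        simp
        ring
      rw [h1, diffs_cons]
      have h2 : s - (s - c) = c := by ring
      have h3 := ih (s + 1) 1
      rw [show (s + 1 - 1 : Int) = s by ring] at h3
      rw [h2, ← h3]
      simp [aRec]
    · have hb : (x == 0) = false := by simpa using hx
      have h1 : bnd s (x :: t) ++ [s + ((x :: t).length : Int)]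
          = bnd (s + 1) t ++ [(s + 1) + (t.length : Int)] := by
        rw [bnd_cons, hb]
        simp
        ring
      rw [h1, show s - c = (s + 1) - (c + 1) by ring, ← ih (s + 1) (c + 1)]
      simp [aRec, hb]

-- A's foldl with accumulator equals acc ++ aRec
theorem foldA (xs : List Int) : ∀ (c : Int) (acc : List Int),
    (xs.foldl stepA (c, acc)).2 ++ [(xs.foldl stepA (c, acc)).1] = acc ++ aRec xs c := by
  induction xs with
  | nil => intro c acc; simp [aRec]
  | cons x t ih =>
    intro c acc
    by_cases hx : x = 0
    · simp only [List.foldl_cons, stepA, hx, beq_self_eq_true, if_pos, aRec]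
      rw [ih 1 (acc ++ [c])]; simp
    · have hb : (x == 0) = false := by simpa using hx
      simp only [List.foldl_cons, stepA, hb, Bool.false_eq_true, if_false, aRec]
      exact ih (c + 1) acc

theorem convert_to_masses_spec : Claim_equal_convert_to_masses := by
  intro label _
  unfold Spec_convert_to_masses convert_to_masses convert_to_masses_alt
  have hA : (label.foldl
      (fun (st : Int × List Int) el =>
        if el == 0 then (1, st.2 ++ [st.1]) else (st.1 + 1, st.2)) (1, []))
    = label.foldl stepA (1, []) := by rfl
  simp only [hA]
  rw [foldA label 1 []]
  have := aRec_eq_diffs label 0 1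
  simpa [bnd, diffs] using this
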